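-- pv_equiv track=rewrite | github.com/Sakhaa-Alsaedi/BioREASONIC | bioreasonc_source_code/eval/metrics.py | _count_chunks
-- ===== SOURCE A (Python) =====
-- from typing import Dict, List, Optional, Tuple, Any, Union
--
-- def _count_chunks(pred: List[str], ref: List[str]) -> int:
--     """Count number of chunks (contiguous matches)."""
--     ref_set = set(ref)
--     in_chunk = False
--     chunks = 0
--
--     for token in pred:
--         if token in ref_set:
--             if not in_chunk:
--                 chunks += 1
--                 in_chunk = True
--         else:
--             in_chunk = False
--
--     return max(chunks, 1)
-- ===== SOURCE B (Python) =====
-- def _count_chunks(pred, ref):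
--     """Chunks = matched tokens minus matched adjacent pairs:
--     each run of k consecutive hits contributes k hits and k-1 internal joins,
--     so hits - joins equals the number of contiguous matched runs."""
--     ref_set = set(ref)
--     hits = sum(1 for t in pred if t in ref_set)
--     joins = sum(1 for a, b in zip(pred, pred[1:]) if a in ref_set and b in ref_set)
--     return max(hits - joins, 1)
-- ===== Notes on version B (the rewrite author's own statement) =====
-- stated objective: alternative
-- what changed: Replaces A's stateful run-detection scan with an arithmetic identity: the chunk count is computed as (number of matched tokens) minus (number of adjacent pairs that are both matched), since a run of k hits has exactly k-1 internal joins.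
import Mathlib
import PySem

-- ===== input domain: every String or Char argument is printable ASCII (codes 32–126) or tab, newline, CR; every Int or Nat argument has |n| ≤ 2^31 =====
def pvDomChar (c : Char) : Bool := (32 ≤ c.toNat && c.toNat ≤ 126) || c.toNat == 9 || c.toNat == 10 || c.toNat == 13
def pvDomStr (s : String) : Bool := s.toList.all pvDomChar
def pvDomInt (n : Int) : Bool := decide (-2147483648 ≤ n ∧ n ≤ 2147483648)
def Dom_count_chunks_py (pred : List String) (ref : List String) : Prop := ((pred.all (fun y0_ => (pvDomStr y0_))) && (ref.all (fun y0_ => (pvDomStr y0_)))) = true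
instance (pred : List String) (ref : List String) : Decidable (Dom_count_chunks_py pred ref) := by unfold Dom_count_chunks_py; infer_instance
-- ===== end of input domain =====

-- B replaces A's stateful run-detection scan by an arithmetic identity: chunks = matched tokens − matched adjacent pairs (alternative algorithm, same cost).

-- ===== PORT A =====
-- literal port of A: single pass keeping (in_chunk, chunks), then max(chunks, 1)
def count_chunks_py (pred : List String) (ref : List String) : Int :=
  let refSet : PySem.Set String := PySem.Set.ofList ref
  let st := pred.foldl (fun (s : Bool × Int) token =>
    if PySem.Set.contains refSet token then
      (if !s.1 then (true, s.2 + 1) else s)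
    else
      (false, s.2)) (false, (0 : Int))
  max st.2 1

-- ===== PORT B =====
-- literal port of B: hits = count of matched tokens, joins = count of adjacent pairs
-- (zip of pred with pred[1:]; the slice pred[1:] is pred.drop 1, exact for start index 1 ≥ 0)
-- that are both matched, result max(hits - joins, 1)
def count_chunks_py_alt (pred : List String) (ref : List String) : Int :=
  let refSet : PySem.Set String := PySem.Set.ofList ref
  let hits : Int := ((pred.countP (fun t => PySem.Set.contains refSet t) : Nat) : Int)
  let joins : Int := (((pred.zip (pred.drop 1)).countP
    (fun q => PySem.Set.contains refSet q.1 && PySem.Set.contains refSet q.2) : Nat) : Int)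
  max (hits - joins) 1

-- ===== PRECONDITION & SPEC =====
def Spec_count_chunks_py (pred : List String) (ref : List String) (out : Int) : Prop := out = count_chunks_py_alt pred ref
instance (pred : List String) (ref : List String) (out : Int) : Decidable (Spec_count_chunks_py pred ref out) := by unfold Spec_count_chunks_py; infer_instance

-- ===== CLAIM (what is proved, stated in full; the proofs are below) =====
def Claim_equal_count_chunks_py : Prop := ∀ (pred : List String) (ref : List String), Dom_count_chunks_py pred ref → Spec_count_chunks_py pred ref (count_chunks_py pred ref)

-- ===== LEMMAS AND PROOFS =====

/-- Number of rising edges of a boolean list, given the value just before it. -/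
def pvEdges (prev : Bool) : List Bool → Int
  | [] => 0
  | x :: xs => (if x && !prev then 1 else 0) + pvEdges x xs

/-- A's loop computes the previous edge count plus the edges of the membership table. -/
theorem pvLoopA (p : String → Bool) : ∀ (l : List String) (b : Bool) (c : Int),
    (l.foldl (fun (s : Bool × Int) token =>
      if p token then (if !s.1 then (true, s.2 + 1) else s) else (false, s.2)) (b, c)).2
      = c + pvEdges b (l.map p) := by
  intro l
  induction l with
  | nil => intro b c; simp [pvEdges]
  | cons x xs ih =>
    intro b c
    cases hx : p x <;> cases b <;>
      simp only [List.foldl_cons, hx, Bool.not_false, Bool.not_true, if_true, if_false,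
        Bool.false_eq_true, ite_true, ite_false] <;>
      rw [ih] <;> simp [pvEdges, hx] <;> ring

/-- The edge count equals the number of trues minus the number of adjacent true pairs
(pairs taken in `(prev :: m).zip m`, i.e. including the pair with the value before the list). -/
theorem pvFormula : ∀ (m : List Bool) (prev : Bool),
    pvEdges prev m = ((m.countP (fun b => b) : Nat) : Int)
      - ((((prev :: m).zip m).countP (fun q => q.1 && q.2) : Nat) : Int) := by
  intro m
  induction m with
  | nil => intro prev; simp [pvEdges]
  | cons x xs ih =>
    intro prev
    have hz : (prev :: x :: xs).zip (x :: xs) = (prev, x) :: ((x :: xs).zip xs) :=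
      rfl
    rw [hz]
    simp only [pvEdges, List.countP_cons, ih x]
    cases x <;> cases prev <;> simp <;> push_cast <;> ring

/-- With `prev = false`, the extra leading pair never counts, so the pair count over
`(false :: m).zip m` equals the pair count over `m.zip (m.drop 1)`. -/
theorem pvZipFalse (m : List Bool) :
    ((false :: m).zip m).countP (fun q => q.1 && q.2)
      = (m.zip (m.drop 1)).countP (fun q => q.1 && q.2) := by
  cases m with
  | nil => rfl
  | cons x xs =>
    have hz : (false :: x :: xs).zip (x :: xs) = (false, x) :: ((x :: xs).zip xs) := rfl
    simp [hz, List.countP_cons]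

-- ===== VERDICT (by name: the statement is the Claim_ definition above) =====
theorem count_chunks_py_spec : Claim_equal_count_chunks_py := by
  intro pred ref _
  unfold Spec_count_chunks_py count_chunks_py count_chunks_py_alt
  simp only
  rw [pvLoopA (fun t => PySem.Set.contains (PySem.Set.ofList ref) t) pred false 0]
  set p := fun t => PySem.Set.contains (PySem.Set.ofList ref) t with hp
  rw [pvFormula (pred.map p) false, pvZipFalse]
  have hm : (pred.map p).countP (fun b => b) = pred.countP p := by
    rw [List.countP_map]; rfl
  have hz : (pred.map p).zip ((pred.map p).drop 1)
      = (pred.zip (pred.drop 1)).map (fun q => (p q.1, p q.2)) := by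
    rw [← List.map_drop, List.zip_map]
    rfl
  have hj : ((pred.map p).zip ((pred.map p).drop 1)).countP (fun q => q.1 && q.2)
      = (pred.zip (pred.drop 1)).countP (fun q => p q.1 && p q.2) := by
    rw [hz, List.countP_map]
    rfl
  rw [hm, hj, hp]
  simp
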